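-- pv_equiv track=rewrite | github.com/MrBrantCode/unitest_baseline | mut_generate/mist_train_cf/cf_88216/solution.py | sum_and_count_digits
-- ===== SOURCE A (Python) =====
-- def sum_and_count_digits(n):
--     # Calculate the sum of digits
--     digit_sum = 0
--     temp_n = n
--     while temp_n > 0:
--         digit_sum += temp_n % 10
--         temp_n //= 10
--
--     # Count the number of unique digits
--     unique_digits = [0] * 10
--     while n > 0:
--         unique_digits[n % 10] = 1
--         n //= 10
--     digit_count = sum(unique_digits)
--
--     return digit_sum, digit_count
-- ===== SOURCE B (Python) =====
-- def sum_and_count_digits(n):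
--     if n <= 0:
--         return 0, 0
--     s = str(n)
--     return sum(int(c) for c in s), len(set(s))
-- ===== Notes on version B (the rewrite author's own statement) =====
-- stated objective: idiomatic
-- what changed: A peels the digits arithmetically twice (a %10///10 while-loop for the sum and a second such loop filling a length-10 presence array); B converts the number to its decimal string once and computes sum(int(c) for c in s) and len(set(s)), with an explicit (0,0) guard for n <= 0 where A's loops never run.
import Mathlib
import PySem

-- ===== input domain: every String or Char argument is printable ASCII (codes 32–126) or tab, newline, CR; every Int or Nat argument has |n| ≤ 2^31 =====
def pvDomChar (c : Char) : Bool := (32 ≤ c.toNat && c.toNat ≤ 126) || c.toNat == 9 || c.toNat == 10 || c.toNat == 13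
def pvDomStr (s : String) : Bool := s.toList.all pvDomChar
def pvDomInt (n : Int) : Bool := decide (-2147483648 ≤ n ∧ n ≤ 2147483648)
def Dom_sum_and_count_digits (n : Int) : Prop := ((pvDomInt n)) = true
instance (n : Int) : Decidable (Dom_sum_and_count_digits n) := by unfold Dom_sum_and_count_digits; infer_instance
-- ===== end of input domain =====

-- B replaces A's two arithmetic digit-peeling loops (%10 // 10 for the sum, plus a
-- length-10 presence array) with the decimal string of n: sum(int(c) for c in str(n))
-- and len(set(str(n))), guarding n <= 0 (where A's loops never run) with (0, 0).

-- termination helper for A's two loops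
theorem pvFdiv10_toNat_lt (n : Int) (h : n > 0) : (PySem.Int.floordiv n 10).toNat < n.toNat := by
  simp only [PySem.Int.floordiv, Int.fdiv_eq_ediv]
  simp
  omega

-- ===== PORT A =====
-- while temp_n > 0: digit_sum += temp_n % 10; temp_n //= 10
def pvALoop1 (digitSum temp_n : Int) : Int :=
  if temp_n > 0 then
    pvALoop1 (digitSum + PySem.Int.mod temp_n 10) (PySem.Int.floordiv temp_n 10)
  else digitSum
termination_by temp_n.toNat
decreasing_by exact pvFdiv10_toNat_lt _ (by assumption)

-- while n > 0: unique_digits[n % 10] = 1; n //= 10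
def pvALoop2 (unique_digits : List Int) (n : Int) : List Int :=
  if n > 0 then
    pvALoop2 (PySem.List.pySetD unique_digits (PySem.Int.mod n 10) 1) (PySem.Int.floordiv n 10)
  else unique_digits
termination_by n.toNat
decreasing_by exact pvFdiv10_toNat_lt _ (by assumption)

def sum_and_count_digits (n : Int) : Int × Int :=
  let digit_sum := pvALoop1 0 n
  let unique_digits := pvALoop2 (List.replicate 10 0) n
  let digit_count := unique_digits.foldl (· + ·) 0
  (digit_sum, digit_count)

-- ===== PORT B =====
-- int(c) for a single character c; on the digit characters of str(n) (n > 0) the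
-- ValueError branch of int() is unreachable, so ofChars? is always 'some' here.
def pvIntOfChar (c : Char) : Int := (PySem.Int.ofChars? [c]).getD 0

def sum_and_count_digits_alt (n : Int) : Int × Int :=
  if n ≤ 0 then (0, 0)
  else
    let s := (PySem.Int.toStr n).toList
    (((s.map pvIntOfChar).sum), PySem.Set.len (PySem.Set.ofList s))

-- ===== PRECONDITION & SPEC =====
def Spec_sum_and_count_digits (n : Int) (out : Int × Int) : Prop := out = sum_and_count_digits_alt n
instance (n : Int) (out : Int × Int) : Decidable (Spec_sum_and_count_digits n out) := by unfold Spec_sum_and_count_digits; infer_instance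

-- ===== CLAIM (what is proved, stated in full; the proofs are below) =====
def Claim_equal_sum_and_count_digits : Prop := ∀ (n : Int), Dom_sum_and_count_digits n → Spec_sum_and_count_digits n (sum_and_count_digits n)

-- ===== LEMMAS AND PROOFS =====

-- reference big-endian digit characters of a positive Nat
def pvDigs (m : Nat) : List Char :=
  if m < 10 then [Nat.digitChar m] else pvDigs (m / 10) ++ [Nat.digitChar (m % 10)]

theorem pvToDigitsCore_eq (fuel : Nat) : ∀ (m : Nat) (acc : List Char), m < fuel →
    Nat.toDigitsCore 10 fuel m acc = pvDigs m ++ acc := by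
  induction fuel with
  | zero => intro m acc h; omega
  | succ f ih =>
    intro m acc h
    rw [Nat.toDigitsCore]
    by_cases h0 : m / 10 = 0
    · have hm : m < 10 := by omega
      rw [if_pos h0, pvDigs, if_pos hm, Nat.mod_eq_of_lt hm]
      simp
    · have hm : ¬ m < 10 := by omega
      rw [if_neg h0, ih (m / 10) _ (by omega)]
      conv_rhs => rw [pvDigs, if_neg hm]
      simp

theorem pvToChars_eq (n : Int) (h : 0 < n) :
    (PySem.Int.toStr n).toList = pvDigs n.toNat := by
  rw [PySem.Int.toList_toStr]
  simp only [PySem.Int.toChars, if_neg (by omega : ¬ n < 0), Nat.toDigits]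
  rw [pvToDigitsCore_eq _ _ _ (by omega)]
  simp

theorem pvDigs_eq_digits (m : Nat) (h : 0 < m) :
    pvDigs m = ((Nat.digits 10 m).reverse).map Nat.digitChar := by
  induction m using Nat.strong_induction_on with
  | _ m ih =>
    rw [Nat.digits_def' (by norm_num) h, pvDigs]
    by_cases hm : m < 10
    · have : m / 10 = 0 := by omega
      rw [if_pos hm, this, Nat.mod_eq_of_lt hm]
      simp
    · rw [if_neg hm, ih (m / 10) (by omega) (by omega)]
      simp

theorem pvIntOfChar_digitChar (d : Nat) (h : d < 10) :
    pvIntOfChar (Nat.digitChar d) = (d : Int) := by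
  interval_cases d <;> decide

-- A's first loop computes the digit sum
theorem pvALoop1_eq (m : Nat) : ∀ (t : Int),
    pvALoop1 t (m : Int) = t + ((Nat.digits 10 m).map (Nat.cast : Nat → Int)).sum := by
  induction m using Nat.strong_induction_on with
  | _ m ih =>
    intro t
    by_cases h : 0 < m
    · have hmod : PySem.Int.mod (m : Int) 10 = ((m % 10 : Nat) : Int) := by
        simp [PySem.Int.mod, Int.fmod_eq_emod]
      have hdiv : PySem.Int.floordiv (m : Int) 10 = ((m / 10 : Nat) : Int) := by
        simp [PySem.Int.floordiv, Int.fdiv_eq_ediv]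
      rw [pvALoop1, if_pos (by exact_mod_cast h), hmod, hdiv,
        ih (m / 10) (by omega), Nat.digits_def' (by norm_num) h]
      simp only [List.map_cons, List.sum_cons]
      ring
    · have : m = 0 := by omega
      subst this
      rw [pvALoop1, if_neg (by norm_num)]
      simp

-- ghost set of digit values accumulated the way A's second loop visits them
def pvDset (s : PySem.Set Int) (n : Int) : PySem.Set Int :=
  if n > 0 then pvDset (PySem.Set.add s (PySem.Int.mod n 10)) (PySem.Int.floordiv n 10) else s
termination_by n.toNat
decreasing_by exact pvFdiv10_toNat_lt _ (by assumption)

-- the 0/1 presence array determined by a set of digits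
def pvInd (s : PySem.Set Int) : List Int :=
  (List.range 10).map (fun i : ℕ => if (i : Int) ∈ s then (1 : Int) else 0)

theorem pvInd_empty : pvInd PySem.Set.empty = List.replicate 10 0 := by decide

theorem pvInd_set (s : PySem.Set Int) (d : Int) (h0 : 0 ≤ d) (h10 : d < 10) :
    PySem.List.pySetD (pvInd s) d 1 = pvInd (PySem.Set.add s d) := by
  rw [PySem.List.pySetD_of_nonneg (pvInd s) 1 h0]
  apply List.ext_getElem
  · simp [pvInd]
  · intro i h1 h2
    simp only [pvInd, List.getElem_set, List.getElem_map, List.getElem_range, PySem.Set.mem_add]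
    simp only [pvInd] at h1 ⊢
    by_cases hi : d.toNat = i
    · have hx : (i : Int) = d := by omega
      simp [hi, hx]
    · have hx : ¬ ((i : Int) = d) := by omega
      simp [hi, hx]

theorem pvSum_map_add (l : List ℕ) (f g : ℕ → Int) :
    (l.map (fun i => f i + g i)).sum = (l.map f).sum + (l.map g).sum := by
  induction l with
  | nil => simp
  | cons x t ih => simp [ih]; ring

theorem pvSum_single (x : Int) (N : ℕ) :
    ((List.range N).map (fun i : ℕ => if (i : Int) = x then (1:Int) else 0)).sum
      = if 0 ≤ x ∧ x < (N : Int) then 1 else 0 := by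
  induction N with
  | zero =>
    have h : ¬ (0 ≤ x ∧ x < ((0:ℕ) : Int)) := by push_cast; omega
    simp only [List.range_zero, List.map_nil, List.sum_nil, if_neg h]
  | succ N ih =>
    rw [List.range_succ, List.map_append, List.sum_append, ih]
    simp only [List.map_cons, List.map_nil, List.sum_cons, List.sum_nil]
    push_cast
    split_ifs <;> omega

theorem pvInd_sum (s : List Int) (hnd : s.Nodup) (hb : ∀ x ∈ s, 0 ≤ x ∧ x < 10) :
    (pvInd s).sum = (s.length : Int) := by
  induction s with
  | nil => simp [pvInd]
  | cons x t ih =>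
    have hxt : x ∉ t := (List.nodup_cons.mp hnd).1
    have hnd' : t.Nodup := (List.nodup_cons.mp hnd).2
    have hb' : ∀ y ∈ t, 0 ≤ y ∧ y < 10 := fun y hy => hb y (List.mem_cons_of_mem _ hy)
    have hx : 0 ≤ x ∧ x < 10 := hb x List.mem_cons_self
    have hcongr : pvInd (x :: t) =
        (List.range 10).map (fun i : ℕ => (if (i : Int) ∈ t then (1:Int) else 0)
          + (if (i : Int) = x then (1:Int) else 0)) := by
      unfold pvInd
      apply List.map_congr_left
      intro i _
      by_cases h1 : (i : Int) = x
      · simp [List.mem_cons, h1, hxt]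
      · by_cases h2 : (i : Int) ∈ t <;> simp [List.mem_cons, h1, h2]
    rw [hcongr, pvSum_map_add, pvSum_single,
      if_pos (by exact_mod_cast hx : 0 ≤ x ∧ x < ((10:ℕ) : Int))]
    have := ih hnd' hb'
    unfold pvInd at this
    rw [this]
    simp

theorem pvSet_add_nodup (s : PySem.Set Int) (d : Int) (h : s.Nodup) :
    (PySem.Set.add s d).Nodup := PySem.Set.nodup_add s d h

-- A's second loop maintains the presence array of pvDset
theorem pvALoop2_eq (s : PySem.Set Int) (n : Int) :
    s.Nodup → (∀ x ∈ s, 0 ≤ x ∧ x < 10) →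
    (pvALoop2 (pvInd s) n).sum = ((pvDset s n).length : Int) := by
  induction s, n using pvDset.induct with
  | case1 s n h ih =>
    intro hnd hb
    have hm : PySem.Int.mod n 10 = n % 10 := by simp [PySem.Int.mod, Int.fmod_eq_emod]
    have hd0 : 0 ≤ PySem.Int.mod n 10 := by rw [hm]; omega
    have hd10 : PySem.Int.mod n 10 < 10 := by rw [hm]; omega
    rw [pvDset, pvALoop2, if_pos h, if_pos h]
    rw [pvInd_set s _ hd0 hd10]
    exact ih (pvSet_add_nodup s _ hnd)
      (fun x hx => by
        rcases (PySem.Set.mem_add s _ x).mp hx with h1 | h1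
        · exact hb x h1
        · exact h1 ▸ ⟨hd0, hd10⟩)
  | case2 s n h =>
    intro hnd hb
    rw [pvDset, pvALoop2, if_neg h, if_neg h]
    exact pvInd_sum s hnd hb

theorem pvDset_nodup (s : PySem.Set Int) (n : Int) (h : s.Nodup) : (pvDset s n).Nodup := by
  induction s, n using pvDset.induct with
  | case1 s n hp ih =>
    rw [pvDset, if_pos hp]
    exact ih (pvSet_add_nodup s _ h)
  | case2 s n hp => rw [pvDset, if_neg hp]; exact h

theorem pvDset_mem (s : PySem.Set Int) (n : Int) (hn : 0 ≤ n) (x : Int) :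
    x ∈ pvDset s n ↔ x ∈ s ∨ x ∈ (Nat.digits 10 n.toNat).map (Nat.cast : Nat → Int) := by
  induction s, n using pvDset.induct with
  | case1 s n hp ih =>
    have hmod : PySem.Int.mod n 10 = ((n.toNat % 10 : Nat) : Int) := by
      simp [PySem.Int.mod, Int.fmod_eq_emod]; omega
    have hdiv : PySem.Int.floordiv n 10 = ((n.toNat / 10 : Nat) : Int) := by
      simp [PySem.Int.floordiv, Int.fdiv_eq_ediv]; omega
    rw [pvDset, if_pos hp, ih (by rw [hdiv]; exact Int.natCast_nonneg _),
      Nat.digits_def' (by norm_num) (by omega : 0 < n.toNat)]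
    rw [hmod, hdiv]
    simp only [PySem.Set.mem_add, List.map_cons, List.mem_cons, Int.toNat_natCast]
    tauto
  | case2 s n hp =>
    rw [pvDset, if_neg hp]
    have : n.toNat = 0 := by omega
    simp [this]

-- ===== VERDICT (by name: the statement is the Claim_ definition above) =====
theorem sum_and_count_digits_spec : Claim_equal_sum_and_count_digits := by
  intro n _
  unfold Spec_sum_and_count_digits sum_and_count_digits sum_and_count_digits_alt
  by_cases hn : n ≤ 0
  · rw [if_pos hn, pvALoop1, if_neg (by omega), pvALoop2, if_neg (by omega)]
    rfl
  · push_neg at hn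
    rw [if_neg (by omega)]
    have hm : 0 < n.toNat := by omega
    have hcast : ((n.toNat : Int)) = n := by omega
    -- digit sum
    have hA1 : pvALoop1 0 n = ((Nat.digits 10 n.toNat).map (Nat.cast : Nat → Int)).sum := by
      conv_lhs => rw [← hcast]
      rw [pvALoop1_eq]
      simp
    have hsum : pvALoop1 0 n = ((PySem.Int.toStr n).toList.map pvIntOfChar).sum := by
      rw [pvToChars_eq n hn, pvDigs_eq_digits _ hm]
      rw [List.map_map, List.map_reverse, List.sum_reverse]
      have : (Nat.digits 10 n.toNat).map (pvIntOfChar ∘ Nat.digitChar)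
          = (Nat.digits 10 n.toNat).map (Nat.cast : Nat → Int) := by
        apply List.map_congr_left
        intro d hd
        exact pvIntOfChar_digitChar d (Nat.digits_lt_base (by norm_num) hd)
      rw [this, hA1]
    -- distinct digit count
    have hcnt : (pvALoop2 (List.replicate 10 0) n).foldl (· + ·) 0
        = PySem.Set.len (PySem.Set.ofList (PySem.Int.toStr n).toList) := by
      rw [← List.sum_eq_foldl, ← pvInd_empty,
        pvALoop2_eq PySem.Set.empty n (by simp [PySem.Set.empty]) (by simp [PySem.Set.empty])]
      -- both sides count the distinct decimal digits of n
      have hA : (pvDset PySem.Set.empty n).length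
          = ((Nat.digits 10 n.toNat).map (Nat.cast : Nat → Int)).toFinset.card := by
        rw [← List.toFinset_card_of_nodup (pvDset_nodup _ n (by simp [PySem.Set.empty]))]
        congr 1
        apply Finset.ext
        intro x
        simp only [List.mem_toFinset]
        rw [pvDset_mem _ n (by omega)]
        simp [PySem.Set.empty]
      have hB : PySem.Set.len (PySem.Set.ofList (PySem.Int.toStr n).toList)
          = (((Nat.digits 10 n.toNat).map (Nat.cast : Nat → Int)).toFinset.card : Int) := by
        have hnd := PySem.Set.nodup_ofList (α := Char) (PySem.Int.toStr n).toList
        have hlen : PySem.Set.len (PySem.Set.ofList (PySem.Int.toStr n).toList)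
            = ((PySem.Set.ofList (PySem.Int.toStr n).toList).length : Int) := by
          simp [PySem.Set.len]
        rw [hlen, ← List.toFinset_card_of_nodup hnd]
        have hset : (PySem.Set.ofList (PySem.Int.toStr n).toList).toFinset
            = ((PySem.Int.toStr n).toList).toFinset := by
          apply Finset.ext; intro x
          simp [List.mem_toFinset, PySem.Set.mem_ofList]
        rw [hset, pvToChars_eq n hn, pvDigs_eq_digits _ hm]
        -- chars = digitChar of digit values; digitChar is injective below 10
        have hchars : ((Nat.digits 10 n.toNat).reverse.map Nat.digitChar).toFinset
            = (Nat.digits 10 n.toNat).toFinset.image Nat.digitChar := by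
          apply Finset.ext; intro x
          simp [List.mem_toFinset, List.mem_map, Finset.mem_image]
        rw [hchars]
        have hvals : ((Nat.digits 10 n.toNat).map (Nat.cast : Nat → Int)).toFinset
            = (Nat.digits 10 n.toNat).toFinset.image (Nat.cast : Nat → Int) := by
          apply Finset.ext; intro x
          simp [List.mem_toFinset, List.mem_map, Finset.mem_image]
        rw [hvals]
        have h1 : ((Nat.digits 10 n.toNat).toFinset.image Nat.digitChar).card
            = (Nat.digits 10 n.toNat).toFinset.card := by
          apply Finset.card_image_of_injOn
          have hinj : ∀ a < 10, ∀ b < 10, Nat.digitChar a = Nat.digitChar b → a = b := by decide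
          intro a ha b hb hab
          exact hinj a (Nat.digits_lt_base (by norm_num) (List.mem_toFinset.mp ha))
            b (Nat.digits_lt_base (by norm_num) (List.mem_toFinset.mp hb)) hab
        have h2 : ((Nat.digits 10 n.toNat).toFinset.image (Nat.cast : Nat → Int)).card
            = (Nat.digits 10 n.toNat).toFinset.card := by
          apply Finset.card_image_of_injOn
          intro a _ b _ hab
          exact_mod_cast hab
        rw [h1, h2]
      rw [hA, hB]
    show (pvALoop1 0 n, (pvALoop2 (List.replicate 10 0) n).foldl (· + ·) 0)
        = (((PySem.Int.toStr n).toList.map pvIntOfChar).sum,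
           PySem.Set.len (PySem.Set.ofList (PySem.Int.toStr n).toList))
    rw [hsum, hcnt]
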